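-- pv_equiv track=rewrite | github.com/anonymous-a31kd/DeepOracle | src/exception_judge.py | judgement_text_process
-- ===== SOURCE A (Python) =====
-- def judgement_text_process(text):
--     lines = text.strip().split('\n')
--     lines.reverse()
--     target_text = 'an unexpected exception:'
--     result = 'No'
--     for line in lines:
--         line = line.replace('*', '').lower()
--         if target_text in line:
--             result = line.split(target_text)[-1]
--             if 'yes' in result:
--                 result = 'Yes'
--             elif 'no' in result:
--                 result = 'No'
--             result = result.strip()
--             return result
--     return result
-- ===== SOURCE B (Python) =====
-- def judgement_text_process(text):
--     target = 'an unexpected exception:'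
--     t = text.strip().replace('*', '').lower()
--     parts = t.split(target)
--     if len(parts) == 1:
--         return 'No'
--     tail = parts[-1].split('\n')[0]
--     if 'yes' in tail:
--         return 'Yes'
--     if 'no' in tail:
--         return 'No'
--     return tail.strip()
-- ===== Notes on version B (the rewrite author's own statement) =====
-- stated objective: alternative
-- what changed: B never iterates over lines: it normalises the whole stripped text once, splits the whole text on the marker string itself, takes the last part, cuts it at the first newline, and classifies that tail; A instead splits into lines, reverses, and scans line by line with an early return.
import Mathlib
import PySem

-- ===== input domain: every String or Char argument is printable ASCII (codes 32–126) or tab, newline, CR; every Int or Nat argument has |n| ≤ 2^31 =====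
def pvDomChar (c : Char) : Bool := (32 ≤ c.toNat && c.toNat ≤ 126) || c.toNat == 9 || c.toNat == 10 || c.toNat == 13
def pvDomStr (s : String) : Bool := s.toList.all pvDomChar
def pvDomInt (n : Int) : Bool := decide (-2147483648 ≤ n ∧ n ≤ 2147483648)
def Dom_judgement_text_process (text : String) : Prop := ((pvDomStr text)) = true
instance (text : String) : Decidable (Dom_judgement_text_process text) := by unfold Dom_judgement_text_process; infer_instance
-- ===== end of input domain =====

-- B never iterates over lines: it normalises the whole stripped text once, splits the whole text on the
-- marker string itself, takes the last part, cuts it at the first newline, and classifies that tail;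
-- objective: an alternative algorithm of the same cost (no line loop at all).

-- ===== PORT A =====
-- A's for-loop with its early return, over the reversed line list
def pvJudgeLoopA : List String → String
  | [] => "No"
  | line :: rest =>
    let line := PySem.Str.lower (PySem.Str.replace line "*" "")
    if PySem.Str.isIn "an unexpected exception:" line then
      -- line.split(target)[-1]: split? on the nonempty literal separator is some and never empty,
      -- so the .getD [] guard never fires and [-1] is getLastD
      let result := ((PySem.Str.split? line "an unexpected exception:").getD []).getLastD ""
      let result := if PySem.Str.isIn "yes" result then "Yes"
                    else if PySem.Str.isIn "no" result then "No"
                    else result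
      PySem.Str.strip result
    else pvJudgeLoopA rest

def judgement_text_process (text : String) : String :=
  pvJudgeLoopA (((PySem.Str.split? (PySem.Str.strip text) "\n").getD []).reverse)

-- ===== PORT B =====
def judgement_text_process_alt (text : String) : String :=
  let t := PySem.Str.lower (PySem.Str.replace (PySem.Str.strip text) "*" "")
  -- t.split(target): split? on the nonempty literal separator is some, so .getD [] never fires
  let parts := (PySem.Str.split? t "an unexpected exception:").getD []
  if parts.length == 1 then "No"
  else
    -- parts[-1] (a split result is never empty, so [-1] is getLastD) and .split('\n')[0] (headD)
    let tail := ((PySem.Str.split? (parts.getLastD "") "\n").getD []).headD ""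
    if PySem.Str.isIn "yes" tail then "Yes"
    else if PySem.Str.isIn "no" tail then "No"
    else PySem.Str.strip tail

-- ===== PRECONDITION & SPEC =====
def Spec_judgement_text_process (text : String) (out : String) : Prop := out = judgement_text_process_alt text
instance (text : String) (out : String) : Decidable (Spec_judgement_text_process text out) := by unfold Spec_judgement_text_process; infer_instance

-- ===== CLAIM (what is proved, stated in full; the proofs are below) =====
def Claim_equal_judgement_text_process : Prop := ∀ (text : String), Dom_judgement_text_process text → Spec_judgement_text_process text (judgement_text_process text)

-- ===== LEMMAS AND PROOFS =====

def pvSplitR (sep : List Char) : List Char → List (List Char)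
  | [] => [[]]
  | c :: rest =>
    if sep.isPrefixOf (c :: rest) ∧ sep ≠ [] then
      [] :: pvSplitR sep ((c :: rest).drop sep.length)
    else
      (pvSplitR sep rest).modifyHead (c :: ·)
termination_by l => l.length
decreasing_by
  · rename_i h
    have h1 : 1 ≤ sep.length := by
      cases sep with
      | nil => exact absurd rfl h.2
      | cons d ds => simp
    simp only [List.length_drop, List.length_cons]
    omega
  · simp

theorem pvSplitR_ne_nil (sep l : List Char) : pvSplitR sep l ≠ [] := by
  induction l using pvSplitR.induct sep with
  | case1 => simp [pvSplitR]
  | case2 c rest h ih => rw [pvSplitR]; simp [h]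
  | case3 c rest h ih =>
    rw [pvSplitR]
    simp only [if_neg h]
    cases h2 : pvSplitR sep rest with
    | nil => exact absurd h2 ih
    | cons a t => simp

theorem pvSplitR_cons_pos {sep : List Char} (hsep : sep ≠ []) {c : Char} {rest : List Char}
    (h : sep.isPrefixOf (c :: rest) = true) :
    pvSplitR sep (c :: rest) = [] :: pvSplitR sep ((c :: rest).drop sep.length) := by
  rw [pvSplitR, if_pos ⟨h, hsep⟩]

theorem pvSplitR_cons_neg {sep : List Char} {c : Char} {rest : List Char}
    (h : ¬ (sep.isPrefixOf (c :: rest) = true ∧ sep ≠ [])) :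
    pvSplitR sep (c :: rest) = (pvSplitR sep rest).modifyHead (c :: ·) := by
  rw [pvSplitR, if_neg h]

theorem pvSplitOn_go_eq (sep : List Char) (hsep : sep ≠ []) :
    ∀ (fuel : Nat) (l cur : List Char) (acc : List (List Char)), l.length ≤ fuel →
      PySem.Chars.splitOn.go sep fuel l cur acc
        = acc.reverse ++ (pvSplitR sep l).modifyHead (cur.reverse ++ ·) := by
  intro fuel
  induction fuel with
  | zero =>
    intro l cur acc hl
    have : l = [] := by cases l <;> simp_all
    subst this
    rw [PySem.Chars.splitOn.go.eq_def]
    simp [pvSplitR]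
  | succ fuel ih =>
    intro l cur acc hl
    cases l with
    | nil =>
      rw [PySem.Chars.splitOn.go.eq_def]
      simp [pvSplitR]
    | cons c rest =>
      rw [PySem.Chars.splitOn.go.eq_def]
      simp only []
      by_cases hP : sep.isPrefixOf (c :: rest) = true
      · rw [if_pos hP]
        have hs1 : 1 ≤ sep.length := by cases sep with | nil => exact absurd rfl hsep | cons d ds => simp
        rw [ih (List.drop sep.length (c :: rest)) [] (cur.reverse :: acc) (by
          have h3 : (List.drop sep.length (c :: rest)).length = rest.length + 1 - sep.length := by simp
          have h4 : rest.length + 1 ≤ fuel + 1 := by simpa using hl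
          omega)]
        rw [pvSplitR, if_pos ⟨hP, hsep⟩]
        simp only [List.reverse_cons, List.reverse_nil, List.nil_append, List.modifyHead_cons,
          List.append_nil, List.append_assoc, List.singleton_append]
        cases h2 : pvSplitR sep (List.drop sep.length (c :: rest)) with
        | nil => exact absurd h2 (by exact pvSplitR_ne_nil sep _)
        | cons a t => simp
      · rw [if_neg hP]
        rw [ih rest (c :: cur) acc (by simpa using Nat.lt_succ_iff.mp (Nat.lt_of_lt_of_le (Nat.lt_succ_self _) hl))]
        rw [pvSplitR, if_neg (by simp [hP])]
        cases h2 : pvSplitR sep rest with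
        | nil => exact absurd h2 (pvSplitR_ne_nil sep rest)
        | cons a t => simp

theorem pvSplitOn_eq (sep : List Char) (hsep : sep ≠ []) (l : List Char) :
    PySem.Chars.splitOn l sep = pvSplitR sep l := by
  rw [PySem.Chars.splitOn, pvSplitOn_go_eq sep hsep (l.length + 1) l [] [] (by omega)]
  cases h2 : pvSplitR sep l with
  | nil => exact absurd h2 (pvSplitR_ne_nil sep l)
  | cons a t => simp

theorem pvJoin_splitR_nl (l : List Char) :
    PySem.Chars.join ['\n'] (pvSplitR ['\n'] l) = l := by
  induction l using pvSplitR.induct ['\n'] with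
  | case1 => simp [pvSplitR, PySem.Chars.join_singleton]
  | case2 c rest h ih =>
    have hc : c = '\n' := by
      have := h.1
      simp [List.isPrefixOf] at this
      exact this.symm
    subst hc
    rw [pvSplitR, if_pos h]
    simp only [List.length_cons, List.length_nil, List.drop_succ_cons, List.drop_zero] at *
    cases h2 : pvSplitR ['\n'] rest with
    | nil => exact absurd h2 (pvSplitR_ne_nil _ _)
    | cons y t =>
      have ih' : PySem.Chars.join ['\n'] (y :: t) = rest := by rw [← h2]; exact ih
      rw [PySem.Chars.join_cons_cons, ih']
      simp
  | case3 c rest h ih =>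
    rw [pvSplitR, if_neg h]
    cases h2 : pvSplitR ['\n'] rest with
    | nil => exact absurd h2 (pvSplitR_ne_nil _ _)
    | cons y t =>
      rw [h2] at ih
      cases t with
      | nil => simp [PySem.Chars.join_singleton] at ih ⊢; rw [ih]
      | cons t0 t1 =>
        simp only [List.modifyHead_cons]
        rw [PySem.Chars.join_cons_cons]
        rw [PySem.Chars.join_cons_cons] at ih
        simp only [List.cons_append, List.append_assoc] at ih ⊢
        rw [ih]

theorem pvPrefix_boundary {sep : List Char} (hns : ('\n' : Char) ∉ sep) (u v : List Char) :
    sep <+: (u ++ '\n' :: v) ↔ sep <+: u := by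
  constructor
  · intro h
    rcases (by omega : sep.length ≤ u.length ∨ u.length < sep.length) with hle | hlt
    · have he := List.prefix_iff_eq_take.mp h
      rw [List.take_append_of_le_length hle] at he
      exact List.prefix_iff_eq_take.mpr he
    · exfalso
      have he := List.prefix_iff_eq_take.mp h
      rw [List.take_append] at he
      have : sep.length - u.length ≥ 1 := by omega
      have hmem : ('\n' : Char) ∈ sep := by
        rw [he]
        apply List.mem_append_right
        cases hn : sep.length - u.length with
        | zero => omega
        | succ k => simp
      exact hns hmem
  · intro h
    exact h.trans (List.prefix_append u ('\n' :: v))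

theorem pvSplitR_of_not_infix {sep : List Char} (_hsep : sep ≠ []) :
    ∀ {l : List Char}, ¬ sep <:+: l → pvSplitR sep l = [l] := by
  intro l
  induction l using pvSplitR.induct sep with
  | case1 => intro _; simp [pvSplitR]
  | case2 c rest h ih =>
    intro hni
    exact absurd ((List.isPrefixOf_iff_prefix.mp h.1).isInfix) hni
  | case3 c rest h ih =>
    intro hni
    rw [pvSplitR, if_neg h]
    rw [ih (fun hi => hni (List.infix_cons_iff.mpr (Or.inr hi)))]
    simp

theorem pvSplitR_singleton {sep : List Char} :
    ∀ {l x : List Char}, pvSplitR sep l = [x] → x = l ∧ ¬ (sep <:+: l ∧ sep ≠ []) := by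
  intro l
  induction l using pvSplitR.induct sep with
  | case1 =>
    intro x hx
    simp [pvSplitR] at hx
    refine ⟨hx, ?_⟩
    rintro ⟨hi, hne⟩
    exact hne (List.eq_nil_of_infix_nil hi)
  | case2 c rest h ih =>
    intro x hx
    rw [pvSplitR, if_pos h] at hx
    exact absurd (List.cons.injEq _ _ _ _ ▸ hx).2 (pvSplitR_ne_nil _ _)
  | case3 c rest h ih =>
    intro x hx
    rw [pvSplitR, if_neg h] at hx
    cases h2 : pvSplitR sep rest with
    | nil => exact absurd h2 (pvSplitR_ne_nil _ _)
    | cons y t =>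
      rw [h2] at hx
      simp only [List.modifyHead_cons] at hx
      have : t = [] ∧ x = c :: y := by
        cases t with
        | nil => simp at hx; exact ⟨rfl, hx.symm⟩
        | cons a b => simp at hx
      obtain ⟨ht, hxy⟩ := this
      subst ht
      obtain ⟨hy, hni⟩ := ih h2
      subst hy
      refine ⟨by simp [hxy], ?_⟩
      rintro ⟨hi, hne⟩
      rcases List.infix_cons_iff.mp hi with hp | hi'
      · exact h ⟨List.isPrefixOf_iff_prefix.mpr hp, hne⟩
      · exact hni ⟨hi', hne⟩

theorem pvSplitR_mem_subset {sep : List Char} :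
    ∀ {l seg : List Char}, seg ∈ pvSplitR sep l → ∀ a ∈ seg, a ∈ l := by
  intro l
  induction l using pvSplitR.induct sep with
  | case1 =>
    intro seg hseg
    simp [pvSplitR] at hseg
    subst hseg
    intro a ha
    simp at ha
  | case2 c rest h ih =>
    intro seg hseg
    rw [pvSplitR, if_pos h] at hseg
    rcases List.mem_cons.mp hseg with h0 | h0
    · subst h0; intro a ha; simp at ha
    · intro a ha
      exact List.mem_of_mem_drop (ih h0 a ha)
  | case3 c rest h ih =>
    intro seg hseg
    rw [pvSplitR, if_neg h] at hseg
    cases h2 : pvSplitR sep rest with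
    | nil => exact absurd h2 (pvSplitR_ne_nil _ _)
    | cons y t =>
      rw [h2] at hseg
      simp only [List.modifyHead_cons] at hseg
      rcases List.mem_cons.mp hseg with h0 | h0
      · subst h0
        intro a ha
        rcases List.mem_cons.mp ha with h1 | h1
        · exact h1 ▸ List.mem_cons_self
        · exact List.mem_cons_of_mem c (ih (h2 ▸ List.mem_cons_self) a h1)
      · intro a ha
        exact List.mem_cons_of_mem c (ih (h2 ▸ List.mem_cons_of_mem y h0) a ha)

theorem pvSplitR_single_not_mem {c : Char} :
    ∀ {l seg : List Char}, seg ∈ pvSplitR [c] l → c ∉ seg := by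
  intro l
  induction l using pvSplitR.induct [c] with
  | case1 =>
    intro seg hseg
    simp [pvSplitR] at hseg
    simp [hseg]
  | case2 d rest h ih =>
    intro seg hseg
    rw [pvSplitR, if_pos h] at hseg
    rcases List.mem_cons.mp hseg with h0 | h0
    · simp [h0]
    · exact ih h0
  | case3 d rest h ih =>
    intro seg hseg
    have hdc : ¬ c = d := by
      intro he
      exact h ⟨by simp [List.isPrefixOf, he], by simp⟩
    rw [pvSplitR, if_neg h] at hseg
    cases h2 : pvSplitR [c] rest with
    | nil => exact absurd h2 (pvSplitR_ne_nil _ _)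
    | cons y t =>
      rw [h2] at hseg
      simp only [List.modifyHead_cons] at hseg
      rcases List.mem_cons.mp hseg with h0 | h0
      · subst h0
        intro hmem
        rcases List.mem_cons.mp hmem with h1 | h1
        · exact hdc h1
        · exact ih (h2 ▸ List.mem_cons_self) h1
      · exact ih (h2 ▸ List.mem_cons_of_mem y h0)

theorem pvSplitR_nl_append (c : Char) (v : List Char) :
    ∀ u : List Char, pvSplitR [c] (u ++ c :: v) = pvSplitR [c] u ++ pvSplitR [c] v := by
  intro u
  induction u using pvSplitR.induct [c] with
  | case1 =>
    rw [List.nil_append, pvSplitR_cons_pos (by simp) (by simp [List.isPrefixOf])]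
    simp [pvSplitR]
  | case2 d rest h ih =>
    have hdc : d = c := by
      have := h.1
      simp [List.isPrefixOf] at this
      exact this.symm
    subst hdc
    rw [List.cons_append, pvSplitR_cons_pos (by simp) (by simp [List.isPrefixOf]),
      pvSplitR_cons_pos (by simp) h.1]
    simp only [List.length_cons, List.length_nil, List.drop_succ_cons, List.drop_zero] at *
    rw [ih]
    simp
  | case3 d rest h ih =>
    have hdc : ¬ c = d := by
      intro he
      exact h ⟨by simp [List.isPrefixOf, he], by simp⟩
    rw [List.cons_append, pvSplitR_cons_neg (by
      rintro ⟨hp, -⟩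
      simp [List.isPrefixOf] at hp
      exact hdc hp), pvSplitR_cons_neg h, ih]
    cases h2 : pvSplitR [c] rest with
    | nil => exact absurd h2 (pvSplitR_ne_nil _ _)
    | cons y t => simp

theorem pvGlue {sep : List Char} (hsep : sep ≠ []) (hns : ('\n' : Char) ∉ sep) (v : List Char) :
    ∀ u : List Char,
    pvSplitR sep (u ++ '\n' :: v)
      = (pvSplitR sep u).dropLast
        ++ ((pvSplitR sep u).getLastD [] ++ '\n' :: (pvSplitR sep v).headD []) :: (pvSplitR sep v).tail := by
  intro u
  induction u using pvSplitR.induct sep with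
  | case1 =>
    rw [List.nil_append, pvSplitR_cons_neg (by
      rintro ⟨hp, -⟩
      have := List.isPrefixOf_iff_prefix.mp hp
      cases sep with
      | nil => exact hsep rfl
      | cons s ss =>
        have hs : s = '\n' := (List.cons_prefix_cons.mp this).1
        exact hns (hs ▸ List.mem_cons_self))]
    cases h2 : pvSplitR sep v with
    | nil => exact absurd h2 (pvSplitR_ne_nil _ _)
    | cons z w => simp [pvSplitR]
  | case2 c rest h ih =>
    have hlen : sep.length ≤ (c :: rest).length := (List.isPrefixOf_iff_prefix.mp h.1).length_le
    have hL : pvSplitR sep ((c :: rest) ++ '\n' :: v)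
        = [] :: pvSplitR sep (((c :: rest) ++ '\n' :: v).drop sep.length) := by
      rw [List.cons_append]
      exact pvSplitR_cons_pos hsep (by
        rw [← List.cons_append]
        exact List.isPrefixOf_iff_prefix.mpr
          ((List.isPrefixOf_iff_prefix.mp h.1).trans (List.prefix_append _ _)))
    rw [List.cons_append] at hL ⊢
    rw [hL]
    rw [show List.drop sep.length (c :: (rest ++ '\n' :: v)) = ((c :: rest).drop sep.length) ++ '\n' :: v from by
      rw [← List.cons_append]; exact List.drop_append_of_le_length hlen]
    rw [ih, pvSplitR_cons_pos hsep h.1]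
    cases h3 : pvSplitR sep ((c :: rest).drop sep.length) with
    | nil => exact absurd h3 (pvSplitR_ne_nil _ _)
    | cons y t =>
      cases t with
      | nil => simp
      | cons t0 t1 => simp
  | case3 c rest h ih =>
    have hpre : ¬ sep <+: (c :: rest) := by
      intro hp
      exact h ⟨List.isPrefixOf_iff_prefix.mpr hp, hsep⟩
    have hL : pvSplitR sep ((c :: rest) ++ '\n' :: v)
        = (pvSplitR sep (rest ++ '\n' :: v)).modifyHead (c :: ·) := by
      rw [List.cons_append]
      exact pvSplitR_cons_neg (by
        rintro ⟨hp, -⟩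
        rw [← List.cons_append] at hp
        exact hpre ((pvPrefix_boundary hns (c :: rest) v).mp (List.isPrefixOf_iff_prefix.mp hp)))
    rw [List.cons_append] at hL ⊢
    rw [hL, pvSplitR_cons_neg h, ih]
    cases h2 : pvSplitR sep rest with
    | nil => exact absurd h2 (pvSplitR_ne_nil _ _)
    | cons y t =>
      cases h3 : pvSplitR sep v with
      | nil => exact absurd h3 (pvSplitR_ne_nil _ _)
      | cons z w =>
        cases t with
        | nil => simp
        | cons t0 t1 => simp

theorem pvReplace_go_eq :
    ∀ (fuel : Nat) (l acc : List Char), l.length ≤ fuel →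
      PySem.Chars.replace.go ['*'] [] fuel l acc
        = acc.reverse ++ l.filter (fun c => !(c == '*')) := by
  intro fuel
  induction fuel with
  | zero =>
    intro l acc hl
    have : l = [] := by cases l <;> simp_all
    subst this
    rw [PySem.Chars.replace.go.eq_def]
    simp
  | succ fuel ih =>
    intro l acc hl
    cases l with
    | nil => rw [PySem.Chars.replace.go.eq_def]; simp
    | cons c rest =>
      rw [PySem.Chars.replace.go.eq_def]
      simp only []
      by_cases hc : c = '*'
      · subst hc
        rw [if_pos (by simp [List.isPrefixOf])]
        rw [show List.drop (['*'] : List Char).length ('*' :: rest) = rest from by simp,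
          show (([] : List Char).reverse ++ acc) = acc from by simp]
        rw [ih rest acc (by simpa using hl)]
        simp
      · rw [if_neg (by
          simp only [List.isPrefixOf, Bool.and_eq_true, beq_iff_eq]
          exact fun h => hc h.1.symm)]
        rw [ih rest (c :: acc) (by simpa using hl)]
        simp [hc]

theorem pvReplace_star_eq (l : List Char) :
    PySem.Chars.replace l ['*'] [] = l.filter (fun c => !(c == '*')) := by
  rw [PySem.Chars.replace]
  simp only [List.isEmpty_cons, Bool.false_eq_true, if_false]
  rw [pvReplace_go_eq l.length l [] (le_refl _)]
  simp

def pvTr (l : List Char) : List Char := PySem.Chars.lower (l.filter (fun c => !(c == '*')))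

theorem pvTr_no_nl {l : List Char} (h : ('\n' : Char) ∉ l) : ('\n' : Char) ∉ pvTr l := by
  intro hm
  simp only [pvTr, PySem.Chars.lower, List.mem_map, List.mem_filter] at hm
  obtain ⟨c, ⟨hcl, _⟩, hlc⟩ := hm
  have hc : c = '\n' := by
    by_cases hu : PySem.Chars.isupper c = true
    · exfalso
      have hb : 65 ≤ c.toNat ∧ c.toNat ≤ 90 := by
        simpa [PySem.Chars.isupper, Char.le_def] using hu
      rw [PySem.Chars.lowerChar, if_pos hu] at hlc
      have : (Char.ofNat (c.toNat + 32)).toNat = ('\n' : Char).toNat := by rw [hlc]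
      rw [Char.toNat_ofNat,
        if_pos (show (c.toNat + 32).isValidChar from Or.inl (by omega))] at this
      have h10 : ('\n' : Char).toNat = 10 := by decide
      omega
    · rw [PySem.Chars.lowerChar, if_neg hu] at hlc
      exact hlc
  exact h (hc ▸ hcl)

theorem pvJoin_append_singleton (sep m : List Char) (r : List (List Char)) (hr : r ≠ []) :
    PySem.Chars.join sep (r ++ [m]) = PySem.Chars.join sep r ++ sep ++ m := by
  induction r with
  | nil => exact absurd rfl hr
  | cons a t ih =>
    cases t with
    | nil => simp [PySem.Chars.join_singleton, PySem.Chars.join_cons_cons]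
    | cons b t' =>
      have ih' := ih (by simp)
      simp only [List.cons_append] at ih' ⊢
      rw [PySem.Chars.join_cons_cons, PySem.Chars.join_cons_cons, ih']
      simp

theorem pvTr_nl : pvTr ['\n'] = ['\n'] := by decide

theorem pvTr_append (x y : List Char) : pvTr (x ++ y) = pvTr x ++ pvTr y := by
  simp [pvTr, PySem.Chars.lower]

theorem pvTr_join (r : List (List Char)) :
    PySem.Chars.join ['\n'] (r.map pvTr) = pvTr (PySem.Chars.join ['\n'] r) := by
  induction r with
  | nil => simp [PySem.Chars.join_nil, pvTr, PySem.Chars.lower]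
  | cons a t ih =>
    cases t with
    | nil => simp [PySem.Chars.join_singleton]
    | cons b t' =>
      simp only [List.map_cons] at ih ⊢
      rw [PySem.Chars.join_cons_cons, PySem.Chars.join_cons_cons, ih, pvTr_append, pvTr_append,
        pvTr_nl]

def pvT : List Char := "an unexpected exception:".toList

def pvClassifyC (r : List Char) : List Char :=
  if PySem.Chars.isIn "yes".toList r then "Yes".toList
  else if PySem.Chars.isIn "no".toList r then "No".toList
  else PySem.Chars.strip r

def pvScanC : List (List Char) → List Char
  | [] => "No".toList
  | tl :: rest =>
    if PySem.Chars.isIn pvT tl then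
      PySem.Chars.strip
        (if PySem.Chars.isIn "yes".toList ((pvSplitR pvT tl).getLastD []) then "Yes".toList
         else if PySem.Chars.isIn "no".toList ((pvSplitR pvT tl).getLastD []) then "No".toList
         else (pvSplitR pvT tl).getLastD [])
    else pvScanC rest

def pvBCore (s : List Char) : List Char :=
  if (pvSplitR pvT s).length = 1 then "No".toList
  else pvClassifyC ((pvSplitR ['\n'] ((pvSplitR pvT s).getLastD [])).headD [])

theorem pvStrip_classify (r : List Char) :
    PySem.Chars.strip
      (if PySem.Chars.isIn "yes".toList r then "Yes".toList
       else if PySem.Chars.isIn "no".toList r then "No".toList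
       else r)
    = pvClassifyC r := by
  unfold pvClassifyC
  split_ifs with h1 h2
  · decide
  · decide
  · rfl

theorem pvGetLastD_irrel {α : Type} : ∀ (l : List α) (q d d' : α), (q :: l).getLastD d = (q :: l).getLastD d' := by
  intro l
  induction l with
  | nil => intro q d d'; rfl
  | cons b t _ => intro q d d'; simp only [List.getLastD_cons]

theorem pvGetLastD_append {α : Type} (p : List α) (q : α) (l : List α) (d : α) :
    (p ++ q :: l).getLastD d = (q :: l).getLastD d := by
  induction p generalizing d with
  | nil => rfl
  | cons a p' ih =>
    rw [List.cons_append, List.getLastD_cons]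
    cases p' with
    | nil => exact pvGetLastD_irrel l q a d
    | cons b p'' =>
      rw [List.cons_append] at ih ⊢
      rw [ih a]
      exact pvGetLastD_irrel l q a d

theorem pvGetLastD_mem {α : Type} {l : List α} (h : l ≠ []) (d : α) : l.getLastD d ∈ l := by
  induction l generalizing d with
  | nil => exact absurd rfl h
  | cons a t ih =>
    rw [List.getLastD_cons]
    cases t with
    | nil => simp
    | cons b t' => exact List.mem_cons_of_mem a (ih (by simp) a)

theorem pvT_ne : pvT ≠ [] := by decide
theorem pvT_no_nl : ('\n' : Char) ∉ pvT := by decide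

-- the tail segment A classifies, for a marker-containing line m: it has no newline, so
-- B's cut at the first newline returns it unchanged
theorem pvTail_no_nl {m : List Char} (hm : ('\n' : Char) ∉ m) :
    (pvSplitR ['\n'] ((pvSplitR pvT m).getLastD [])).headD [] = (pvSplitR pvT m).getLastD [] := by
  have hmem : (pvSplitR pvT m).getLastD [] ∈ pvSplitR pvT m :=
    pvGetLastD_mem (pvSplitR_ne_nil _ _) []
  have hsub := pvSplitR_mem_subset hmem
  have hni : ¬ (['\n'] : List Char) <:+: (pvSplitR pvT m).getLastD [] := by
    intro hi
    exact hm (hsub '\n' (hi.subset List.mem_cons_self))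
  rw [pvSplitR_of_not_infix (by simp) hni]
  rfl

theorem pvNotOne {m : List Char} (hinf : pvT <:+: m) : (pvSplitR pvT m).length ≠ 1 := by
  intro h1
  obtain ⟨x, hx⟩ := List.length_eq_one_iff.mp h1
  exact (pvSplitR_singleton hx).2 ⟨hinf, pvT_ne⟩

theorem pvMain : ∀ r : List (List Char), (∀ ℓ ∈ r, ('\n' : Char) ∉ ℓ) →
    pvScanC r = pvBCore (PySem.Chars.join ['\n'] r.reverse) := by
  intro r
  induction r with
  | nil =>
    intro _
    simp [pvScanC, pvBCore, PySem.Chars.join_nil, pvSplitR]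
  | cons m r' ih =>
    intro hnl
    have hm : ('\n' : Char) ∉ m := hnl m List.mem_cons_self
    have hr' : ∀ ℓ ∈ r', ('\n' : Char) ∉ ℓ := fun ℓ hℓ => hnl ℓ (List.mem_cons_of_mem m hℓ)
    rw [List.reverse_cons]
    by_cases hin : PySem.Chars.isIn pvT m = true
    · have hinf : pvT <:+: m := (PySem.Chars.isIn_iff_infix pvT m).mp hin
      rw [pvScanC, if_pos hin, pvStrip_classify]
      rcases eq_or_ne r' [] with hre | hre
      · subst hre
        rw [show (([] : List (List Char)).reverse ++ [m]) = [m] from rfl,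
          PySem.Chars.join_singleton, pvBCore, if_neg (pvNotOne hinf), pvTail_no_nl hm]
      · have hrev : r'.reverse ≠ [] := by simpa using hre
        rw [pvJoin_append_singleton _ _ _ hrev]
        rw [show PySem.Chars.join ['\n'] r'.reverse ++ ['\n'] ++ m
            = PySem.Chars.join ['\n'] r'.reverse ++ '\n' :: m from by simp]
        rw [pvBCore, pvGlue pvT_ne pvT_no_nl m (PySem.Chars.join ['\n'] r'.reverse)]
        set xs := pvSplitR pvT (PySem.Chars.join ['\n'] r'.reverse) with hxs
        set ys := pvSplitR pvT m with hys
        have hxs_ne : xs ≠ [] := pvSplitR_ne_nil _ _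
        have hys_ne : ys ≠ [] := pvSplitR_ne_nil _ _
        have hys_tl : ys.tail ≠ [] := by
          intro ht
          obtain ⟨z, w, hy⟩ : ∃ z w, ys = z :: w := by
            cases hy : ys with
            | nil => exact absurd hy hys_ne
            | cons z w => exact ⟨z, w, rfl⟩
          have hw : w = [] := by rw [hy] at ht; exact ht
          exact pvNotOne hinf (by rw [← hys, hy, hw]; rfl)
        have hlen : (xs.dropLast ++ (xs.getLastD [] ++ '\n' :: ys.headD []) :: ys.tail).length ≠ 1 := by
          have h1 : 0 < xs.length := List.length_pos_iff.mpr hxs_ne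
          have h2 : 0 < ys.tail.length := List.length_pos_iff.mpr hys_tl
          simp only [List.length_append, List.length_cons, List.length_dropLast]
          omega
        rw [if_neg hlen]
        have hlast : (xs.dropLast ++ (xs.getLastD [] ++ '\n' :: ys.headD []) :: ys.tail).getLastD []
            = ys.getLastD [] := by
          rw [pvGetLastD_append]
          obtain ⟨z, w, hy⟩ : ∃ z w, ys = z :: w := by
            cases hy : ys with
            | nil => exact absurd hy hys_ne
            | cons z w => exact ⟨z, w, rfl⟩
          obtain ⟨w0, ws, hw⟩ : ∃ w0 ws, w = w0 :: ws := by
            cases hw : w with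
            | nil => rw [hy, hw] at hys_tl; exact absurd rfl hys_tl
            | cons w0 ws => exact ⟨w0, ws, rfl⟩
          rw [hy, hw]
          simp only [List.tail_cons, List.getLastD_cons]
        rw [hlast, pvTail_no_nl hm]
    · rw [pvScanC, if_neg hin]
      have hninf : ¬ pvT <:+: m := fun hi => hin ((PySem.Chars.isIn_iff_infix pvT m).mpr hi)
      have hym : pvSplitR pvT m = [m] := pvSplitR_of_not_infix pvT_ne hninf
      rcases eq_or_ne r' [] with hre | hre
      · subst hre
        rw [show (([] : List (List Char)).reverse ++ [m]) = [m] from rfl,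
          PySem.Chars.join_singleton, pvBCore, if_pos (by rw [hym]; rfl)]
        rfl
      · have hrev : r'.reverse ≠ [] := by simpa using hre
        rw [pvJoin_append_singleton _ _ _ hrev]
        rw [show PySem.Chars.join ['\n'] r'.reverse ++ ['\n'] ++ m
            = PySem.Chars.join ['\n'] r'.reverse ++ '\n' :: m from by simp]
        rw [ih hr']
        rw [pvBCore, pvBCore, pvGlue pvT_ne pvT_no_nl m (PySem.Chars.join ['\n'] r'.reverse)]
        set xs := pvSplitR pvT (PySem.Chars.join ['\n'] r'.reverse) with hxs
        have hxs_ne : xs ≠ [] := pvSplitR_ne_nil _ _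
        rw [hym]
        have hlen : (xs.dropLast ++ (xs.getLastD [] ++ '\n' :: ([m] : List (List Char)).headD []) :: ([m] : List (List Char)).tail).length = xs.length := by
          simp [List.length_dropLast]
          have : 1 ≤ xs.length := List.length_pos_iff.mpr hxs_ne
          omega
        by_cases hx1 : xs.length = 1
        · rw [if_pos hx1, if_pos (hlen.trans hx1)]
        · rw [if_neg hx1, if_neg (fun h => hx1 (hlen.symm.trans h))]
          have hlast : (xs.dropLast ++ (xs.getLastD [] ++ '\n' :: ([m] : List (List Char)).headD []) :: ([m] : List (List Char)).tail).getLastD []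
              = xs.getLastD [] ++ '\n' :: m := by
            rw [pvGetLastD_append]
            rfl
          rw [hlast]
          rw [show xs.getLastD [] ++ '\n' :: m = xs.getLastD [] ++ '\n' :: m from rfl]
          rw [pvSplitR_nl_append '\n' m (xs.getLastD [])]
          cases hsp : pvSplitR ['\n'] (xs.getLastD []) with
          | nil => exact absurd hsp (pvSplitR_ne_nil _ _)
          | cons q qs => rfl

theorem pvToList_getLastD : ∀ (xs : List String) (d : String),
    (xs.getLastD d).toList = (xs.map String.toList).getLastD d.toList := by
  intro xs
  induction xs with
  | nil => intro d; rfl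
  | cons a t ih =>
    intro d
    rw [List.getLastD_cons, List.map_cons, List.getLastD_cons, ih a]

theorem pvToList_headD (xs : List String) :
    (xs.headD "").toList = (xs.map String.toList).headD [] := by
  cases xs <;> rfl

theorem pvSplit?_getD (s sep : String) (hsep : sep.toList ≠ []) :
    ((PySem.Str.split? s sep).getD []).map String.toList = pvSplitR sep.toList s.toList := by
  have h := PySem.Str.split?_map s sep
  rw [PySem.Chars.split?, if_neg (by simpa using hsep)] at h
  cases hs : PySem.Str.split? s sep with
  | none => rw [hs] at h; simp at h
  | some parts =>
    rw [hs] at h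
    simp only [Option.map_some, Option.some.injEq] at h
    simp only [Option.getD_some]
    rw [h, pvSplitOn_eq _ hsep]

theorem pvTr_of_str (line : String) :
    (PySem.Str.lower (PySem.Str.replace line "*" "")).toList = pvTr line.toList := by
  rw [PySem.Str.toList_lower, PySem.Str.toList_replace]
  rw [show ("*" : String).toList = ['*'] from rfl, show ("" : String).toList = [] from rfl]
  rw [pvReplace_star_eq]
  rfl

theorem pvBridgeA : ∀ ls : List String,
    (pvJudgeLoopA ls).toList = pvScanC (ls.map (fun l => pvTr l.toList)) := by
  intro ls
  induction ls with
  | nil => rfl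
  | cons line rest ih =>
    rw [pvJudgeLoopA, List.map_cons, pvScanC]
    simp only []
    have hc : PySem.Str.isIn "an unexpected exception:" (PySem.Str.lower (PySem.Str.replace line "*" ""))
        = PySem.Chars.isIn pvT (pvTr line.toList) := by
      rw [PySem.Str.isIn_eq, pvTr_of_str]
      rfl
    by_cases hin : PySem.Chars.isIn pvT (pvTr line.toList) = true
    · rw [hc, if_pos hin, if_pos hin]
      have hres : (((PySem.Str.split? (PySem.Str.lower (PySem.Str.replace line "*" ""))
            "an unexpected exception:").getD []).getLastD "").toList
          = (pvSplitR pvT (pvTr line.toList)).getLastD [] := by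
        rw [pvToList_getLastD, pvSplit?_getD _ _ (by decide), pvTr_of_str]
        rfl
      rw [PySem.Str.toList_strip, apply_ite String.toList, apply_ite String.toList]
      rw [PySem.Str.isIn_eq, PySem.Str.isIn_eq, hres]
    · rw [hc, if_neg hin, if_neg hin]
      exact ih

theorem pvBridgeB (text : String) :
    (judgement_text_process_alt text).toList
      = pvBCore (pvTr (PySem.Chars.strip text.toList)) := by
  unfold judgement_text_process_alt
  simp only []
  have ht : (PySem.Str.lower (PySem.Str.replace (PySem.Str.strip text) "*" "")).toList
      = pvTr (PySem.Chars.strip text.toList) := by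
    rw [pvTr_of_str, PySem.Str.toList_strip]
  have hparts : ((PySem.Str.split? (PySem.Str.lower (PySem.Str.replace (PySem.Str.strip text) "*" ""))
        "an unexpected exception:").getD []).map String.toList
      = pvSplitR pvT (pvTr (PySem.Chars.strip text.toList)) := by
    rw [pvSplit?_getD _ _ (by decide), ht]
    rfl
  have hlen : ((PySem.Str.split? (PySem.Str.lower (PySem.Str.replace (PySem.Str.strip text) "*" ""))
        "an unexpected exception:").getD []).length
      = (pvSplitR pvT (pvTr (PySem.Chars.strip text.toList))).length := by
    rw [← hparts, List.length_map]
  rw [pvBCore]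
  by_cases h1 : (pvSplitR pvT (pvTr (PySem.Chars.strip text.toList))).length = 1
  · rw [if_pos h1, if_pos (by rw [hlen, h1]; rfl)]
  · rw [if_neg h1, if_neg (by simp only [beq_iff_eq, hlen]; exact h1)]
    have htail : (((PySem.Str.split? (((PySem.Str.split? (PySem.Str.lower (PySem.Str.replace
          (PySem.Str.strip text) "*" "")) "an unexpected exception:").getD []).getLastD "")
          "\n").getD []).headD "").toList
        = (pvSplitR ['\n'] ((pvSplitR pvT (pvTr (PySem.Chars.strip text.toList))).getLastD [])).headD [] := by
      rw [pvToList_headD, pvSplit?_getD _ _ (by decide)]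
      rw [show (("\n" : String)).toList = ['\n'] from rfl]
      rw [pvToList_getLastD, hparts]
      rfl
    rw [apply_ite String.toList, apply_ite String.toList, PySem.Str.isIn_eq, PySem.Str.isIn_eq,
      PySem.Str.toList_strip, htail]
    rfl

theorem pvFinal (text : String) :
    (judgement_text_process text).toList = (judgement_text_process_alt text).toList := by
  rw [pvBridgeB]
  unfold judgement_text_process
  rw [pvBridgeA, List.map_reverse]
  have hparts : (((PySem.Str.split? (PySem.Str.strip text) "\n").getD []).map
        (fun l => pvTr l.toList))
      = (pvSplitR ['\n'] (PySem.Chars.strip text.toList)).map pvTr := by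
    rw [show (fun l : String => pvTr l.toList) = pvTr ∘ String.toList from rfl, ← List.map_map]
    rw [pvSplit?_getD _ _ (by decide), PySem.Str.toList_strip]
    rfl
  rw [hparts]
  rw [pvMain _ (by
    intro ℓ hℓ
    rw [List.mem_reverse] at hℓ
    obtain ⟨ℓ0, hℓ0, rfl⟩ := List.mem_map.mp hℓ
    exact pvTr_no_nl (pvSplitR_single_not_mem hℓ0))]
  rw [List.reverse_reverse, pvTr_join, pvJoin_splitR_nl]

-- ===== VERDICT (by name: the statement is the Claim_ definition above) =====
theorem judgement_text_process_spec : Claim_equal_judgement_text_process := by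
  intro text _
  unfold Spec_judgement_text_process
  exact String.toList_inj.mp (pvFinal text)
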